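-- pv_equiv track=rewrite | github.com/ppc86193-lgtm/cloud-function-source | pc28-main-function/pc28-main-function-cloud/code_analyzer.py | _count_duplicate_lines
-- ===== SOURCE A (Python) =====
-- from typing import Dict, List, Tuple, Set, Optional, Any
-- from collections import defaultdict, Counter
--
-- def _count_duplicate_lines(lines: List[str]) -> int:
--     """统计重复代码行数"""
--     # 过滤空行和注释行
--     code_lines = []
--     for line in lines:
--         stripped = line.strip()
--         if stripped and not stripped.startswith('#'):
--             # 标准化代码行（移除多余空格）
--             normalized = ' '.join(stripped.split())
--             code_lines.append(normalized)
--
--     # 统计重复行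
--     line_counts = Counter(code_lines)
--     duplicate_count = sum(count - 1 for count in line_counts.values() if count > 1)
--
--     return duplicate_count
-- ===== SOURCE B (Python) =====
-- def _count_duplicate_lines(lines):
--     """Count duplicate normalized non-comment code lines in a single pass."""
--     seen = set()
--     duplicates = 0
--     for line in lines:
--         stripped = line.strip()
--         if stripped and not stripped.startswith('#'):
--             normalized = ' '.join(stripped.split())
--             if normalized in seen:
--                 duplicates += 1
--             else:
--                 seen.add(normalized)
--     return duplicates
-- ===== Notes on version B (the rewrite author's own statement) =====
-- stated objective: simpler
-- what changed: Replaces the build-Counter-then-sum-over-buckets two-phase structure with a single pass that keeps a seen-set and increments a running duplicate count whenever a normalized line was already seen; no intermediate list or counter is built.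
import Mathlib
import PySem

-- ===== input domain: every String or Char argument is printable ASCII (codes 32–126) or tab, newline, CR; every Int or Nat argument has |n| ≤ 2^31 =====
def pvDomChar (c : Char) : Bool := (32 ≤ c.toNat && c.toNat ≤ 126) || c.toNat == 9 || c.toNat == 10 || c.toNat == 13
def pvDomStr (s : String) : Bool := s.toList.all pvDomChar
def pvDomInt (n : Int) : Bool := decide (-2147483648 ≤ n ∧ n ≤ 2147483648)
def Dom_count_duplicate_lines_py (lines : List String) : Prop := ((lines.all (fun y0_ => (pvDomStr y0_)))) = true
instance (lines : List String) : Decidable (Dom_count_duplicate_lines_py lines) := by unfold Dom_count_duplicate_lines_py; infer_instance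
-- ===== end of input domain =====

-- B replaces A's build-list-then-Counter-then-sum structure by ONE pass keeping a seen-set
-- and a running duplicate count (objective: simpler; same filtering/normalization).

-- ===== PORT A =====
def count_duplicate_lines_py (lines : List String) : Int :=
  let code_lines : List String := lines.foldl (fun code_lines line =>
    let stripped := PySem.Str.strip line
    if stripped != "" && !PySem.Str.startswith stripped "#" then
      code_lines ++ [PySem.Str.join " " (PySem.Str.split₀ stripped)]
    else code_lines) []
  let line_counts := PySem.Dict.counter code_lines
  ((line_counts.values.filter (fun c => decide (c > 1))).map (fun c => c - 1)).sum

-- ===== PORT B =====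
def count_duplicate_lines_py_alt (lines : List String) : Int :=
  (lines.foldl (fun (st : PySem.Set String × Int) line =>
    let stripped := PySem.Str.strip line
    if stripped != "" && !PySem.Str.startswith stripped "#" then
      let normalized := PySem.Str.join " " (PySem.Str.split₀ stripped)
      if st.1.contains normalized then (st.1, st.2 + 1) else (st.1.add normalized, st.2)
    else st) (PySem.Set.empty, 0)).2

-- ===== PRECONDITION & SPEC =====
def Spec_count_duplicate_lines_py (lines : List String) (out : Int) : Prop := out = count_duplicate_lines_py_alt lines
instance (lines : List String) (out : Int) : Decidable (Spec_count_duplicate_lines_py lines out) := by unfold Spec_count_duplicate_lines_py; infer_instance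

-- ===== CLAIM (what is proved, stated in full; the proofs are below) =====
def Claim_equal_count_duplicate_lines_py : Prop := ∀ (lines : List String), Dom_count_duplicate_lines_py lines → Spec_count_duplicate_lines_py lines (count_duplicate_lines_py lines)

-- ===== LEMMAS AND PROOFS =====

-- the filter predicate and the normalization both ports share (proof-only abbreviations)
def pvP (line : String) : Bool :=
  PySem.Str.strip line != "" && !PySem.Str.startswith (PySem.Str.strip line) "#"
def pvF (line : String) : String :=
  PySem.Str.join " " (PySem.Str.split₀ (PySem.Str.strip line))

-- both ports' loop over `lines` is a fold of its step over the filtered, normalized lines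
theorem pv_foldl_step {σ : Type} (g : σ → String → σ) :
    ∀ (l : List String) (s : σ),
      l.foldl (fun s line =>
        let stripped := PySem.Str.strip line
        if stripped != "" && !PySem.Str.startswith stripped "#" then
          g s (PySem.Str.join " " (PySem.Str.split₀ stripped)) else s) s
      = ((l.filter pvP).map pvF).foldl g s := by
  intro l
  induction l with
  | nil => intro s; rfl
  | cons x t ih =>
    intro s
    rw [List.foldl_cons, List.filter_cons,
      show (let stripped := PySem.Str.strip x;
        if (stripped != "" && !PySem.Str.startswith stripped "#") = true then
          g s (PySem.Str.join " " (PySem.Str.split₀ stripped)) else s)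
        = if pvP x = true then g s (pvF x) else s from rfl]
    by_cases h : pvP x = true
    · rw [if_pos h, if_pos h, List.map_cons, List.foldl_cons]; exact ih _
    · rw [if_neg h, if_neg h]; exact ih s

-- B's dedup-counting step, as a pure fold over the normalized code lines
def pvDupStep (st : PySem.Set String × Int) (y : String) : PySem.Set String × Int :=
  if st.1.contains y then (st.1, st.2 + 1) else (st.1.add y, st.2)

theorem pv_dup_invariant :
    ∀ (ys : List String) (seen : PySem.Set String) (c : Int),
      (ys.foldl pvDupStep (seen, c)).2 + ((PySem.Set.update seen ys).length : Int)
        = c + (seen.length : Int) + ys.length := by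
  intro ys
  induction ys with
  | nil => intro seen c; simp [PySem.Set.update]
  | cons y t ih =>
    intro seen c
    rw [List.foldl_cons]
    by_cases h : seen.contains y = true
    · have hadd : seen.add y = seen := by simp only [PySem.Set.add, h, if_pos]
      have hstep : pvDupStep (seen, c) y = (seen, c + 1) := by
        rw [show pvDupStep (seen, c) y
          = if seen.contains y = true then ((seen, c + 1) : PySem.Set String × Int)
            else (seen.add y, c) from rfl, if_pos h]
      rw [hstep, show PySem.Set.update seen (y :: t) = PySem.Set.update seen t from by
        simp only [PySem.Set.update, List.foldl_cons, hadd]]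
      rw [ih seen (c + 1)]
      simp only [List.length_cons]
      push_cast
      ring
    · have hadd : seen.add y = seen ++ [y] := by
        simp only [PySem.Set.add]
        rw [if_neg h]
      have hstep : pvDupStep (seen, c) y = (seen.add y, c) := by
        rw [show pvDupStep (seen, c) y
          = if seen.contains y = true then ((seen, c + 1) : PySem.Set String × Int)
            else (seen.add y, c) from rfl, if_neg h]
      rw [hstep, show PySem.Set.update seen (y :: t) = PySem.Set.update (seen.add y) t from by
        simp only [PySem.Set.update, List.foldl_cons]]
      rw [ih (seen.add y) c, hadd]
      simp only [List.length_append, List.length_cons, List.length_nil]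
      push_cast
      ring

-- A's Counter values are the per-distinct-line counts over the normalized code lines
theorem pv_counter_values (ys : List String) :
    (PySem.Dict.counter ys).values
      = (PySem.Set.ofList ys).map (fun k => ((ys.count k : Nat) : Int)) := by
  simp only [PySem.Dict.values, PySem.Dict.items_counter, List.map_map]
  rfl

theorem pv_sum_buckets (ys ks : List String) (h : ∀ k ∈ ks, k ∈ ys) :
    (((ks.map (fun k => ((ys.count k : Nat) : Int))).filter (fun c => decide (c > 1))).map
        (fun c => c - 1)).sum
      = (ks.map (fun k => ((ys.count k : Nat) : Int))).sum - ks.length := by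
  induction ks with
  | nil => simp
  | cons k t ih =>
    have hmem : k ∈ ys := h k (List.mem_cons_self)
    have h1 : 1 ≤ ys.count k := List.count_pos_iff.mpr hmem
    have ih' := ih (fun a ha => h a (List.mem_cons_of_mem _ ha))
    by_cases hc : ((ys.count k : Nat) : Int) > 1
    · simp only [List.map_cons, List.filter_cons, hc, decide_true, List.map_cons,
        List.sum_cons, List.length_cons, if_pos]
      push_cast at *
      omega
    · have hc1 : ((ys.count k : Nat) : Int) = 1 := by push_cast at *; omega
      simp only [List.map_cons, List.filter_cons, List.sum_cons, List.length_cons]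
      rw [show decide (((ys.count k : Nat) : Int) > 1) = false from by simp [hc]]
      simp only [if_neg, Bool.false_eq_true, not_false_iff, ih', hc1]
      push_cast
      omega

-- summing the counts over the distinct normalized lines recovers the total line count
theorem pv_sum_counts (ys : List String) :
    ((PySem.Set.ofList ys).map (fun k => ((ys.count k : Nat) : Int))).sum
      = (ys.length : Int) := by
  have hperm : List.Perm (PySem.Set.ofList ys) ys.dedup := by
    rw [List.perm_ext_iff_of_nodup (PySem.Set.nodup_ofList ys) ys.nodup_dedup]
    intro a
    rw [PySem.Set.mem_ofList, List.mem_dedup]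
  rw [(hperm.map (fun k => ((ys.count k : Nat) : Int))).sum_eq,
    ← List.sum_map_count_dedup_eq_length ys, Nat.cast_list_sum, List.map_map]
  rfl

-- the distinct set built by B's loop is exactly Set.ofList of the normalized code lines
theorem pv_update_empty (ys : List String) :
    PySem.Set.update PySem.Set.empty ys = PySem.Set.ofList ys := rfl

-- ===== VERDICT (by name: the statement is the Claim_ definition above) =====
theorem count_duplicate_lines_py_spec : Claim_equal_count_duplicate_lines_py := by
  intro lines _
  unfold Spec_count_duplicate_lines_py
  have hA : lines.foldl (fun code_lines line =>
      let stripped := PySem.Str.strip line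
      if stripped != "" && !PySem.Str.startswith stripped "#" then
        code_lines ++ [PySem.Str.join " " (PySem.Str.split₀ stripped)]
      else code_lines) []
      = ((lines.filter pvP).map pvF).foldl (fun acc b => acc ++ [b]) [] :=
    pv_foldl_step (fun (acc : List String) b => acc ++ [b]) lines []
  have hB : lines.foldl (fun (st : PySem.Set String × Int) line =>
      let stripped := PySem.Str.strip line
      if stripped != "" && !PySem.Str.startswith stripped "#" then
        let normalized := PySem.Str.join " " (PySem.Str.split₀ stripped)
        if st.1.contains normalized then (st.1, st.2 + 1) else (st.1.add normalized, st.2)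
      else st) (PySem.Set.empty, 0)
      = ((lines.filter pvP).map pvF).foldl pvDupStep (PySem.Set.empty, 0) :=
    pv_foldl_step pvDupStep lines _
  set ys : List String := (lines.filter pvP).map pvF with hys
  have hinv := pv_dup_invariant ys PySem.Set.empty 0
  rw [pv_update_empty] at hinv
  unfold count_duplicate_lines_py count_duplicate_lines_py_alt
  rw [hA, hB, PySem.List.foldl_append_singleton, List.nil_append]
  show (List.map (fun c => c - 1)
      (List.filter (fun c => decide (c > 1)) (PySem.Dict.counter ys).values)).sum
    = (List.foldl pvDupStep (PySem.Set.empty, 0) ys).2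
  rw [pv_counter_values ys,
    pv_sum_buckets ys (PySem.Set.ofList ys)
      (fun k hk => (PySem.Set.mem_ofList ys k).mp hk),
    pv_sum_counts ys]
  simp only [PySem.Set.empty, List.length_nil, Nat.cast_zero] at hinv ⊢
  omega
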